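-- pv_equiv track=rewrite | github.com/bbolli/plagg | plagg/__init__.py | _matchHours
-- ===== SOURCE A (Python) =====
-- def _matchHours(hours, currentHour):
--     """Returns true if currentHour is present in hours.
--     hours is a comma-separated list of ranges or single hour numbers,
--     e.g. 0-5,12,17 or 0,1,3-9,14-18. currentHour is in 24-hour (military)
--     format."""
--     for r in hours.split(','):
--         try:
--             h = [int(part) for part in r.split('-')]
--         except ValueError:      # catch failing string to int conversions
--             continue
--         if len(h) == 2 and h[0] <= currentHour <= h[1]:
--             return True
--         if len(h) == 1 and h[0] == currentHour:
--             return True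
--     return False
-- ===== SOURCE B (Python) =====
-- def _matchHours(hours, currentHour):
--     """Returns true if currentHour is present in hours."""
--     # Phase 1: collect every token as an inclusive (start, end) interval.
--     intervals = []
--     for r in hours.split(','):
--         try:
--             bounds = [int(part) for part in r.split('-')]
--         except ValueError:
--             continue
--         if len(bounds) == 1:
--             intervals.append((bounds[0], bounds[0]))
--         elif len(bounds) == 2:
--             intervals.append((bounds[0], bounds[1]))
--     # Phase 2: sort by interval start, then scan; once an interval starts
--     # after currentHour, no later (sorted) interval can contain it.
--     intervals.sort(key=lambda iv: iv[0])
--     for lo, hi in intervals: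
--         if lo > currentHour:
--             return False
--         if currentHour <= hi:
--             return True
--     return False
-- ===== Notes on version B (the rewrite author's own statement) =====
-- stated objective: alternative
-- what changed: B is a staged sort-then-scan algorithm: it first collects every comma-token into an inclusive (start, end) interval list, sorts the list by interval start, and then scans it with an early stop as soon as an interval starts after currentHour, instead of A's single loop that tests each token in place with length-dependent comparisons and returns on the first hit.
import Mathlib
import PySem

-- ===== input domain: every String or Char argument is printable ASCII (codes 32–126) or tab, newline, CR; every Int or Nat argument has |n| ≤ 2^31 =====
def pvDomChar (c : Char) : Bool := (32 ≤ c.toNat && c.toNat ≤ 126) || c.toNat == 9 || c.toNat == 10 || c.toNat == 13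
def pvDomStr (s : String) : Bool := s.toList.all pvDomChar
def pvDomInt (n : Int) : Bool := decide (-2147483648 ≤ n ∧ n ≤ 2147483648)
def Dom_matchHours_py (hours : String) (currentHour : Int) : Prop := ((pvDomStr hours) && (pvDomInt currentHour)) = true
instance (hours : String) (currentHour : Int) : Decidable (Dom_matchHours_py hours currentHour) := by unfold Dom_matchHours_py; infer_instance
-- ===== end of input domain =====

-- B replaces A's per-token short-circuit test by a staged algorithm: collect all tokens
-- as inclusive intervals, sort them by start, then scan with an early stop once an
-- interval starts after currentHour (objective: alternative).

-- ===== PORT A =====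
-- s.split(sep) for the nonempty literal separators used below (split? is `some` whenever sep is nonempty)
def pvSplit (s sep : String) : List String := (PySem.Str.split? s sep).getD []

-- the list comprehension [int(part) for part in r.split('-')] with its ValueError escape
def pvIntsAll : List String → Option (List Int)
  | [] => some []
  | p :: ps =>
    match PySem.Int.ofStr? p with
    | none => none
    | some v =>
      match pvIntsAll ps with
      | none => none
      | some vs => some (v :: vs)

-- A's for-loop with early return; h[0]/h[1] read with getD, reached only under the length guards
def pvLoopA (currentHour : Int) : List String → Bool
  | [] => false
  | r :: rs =>
    match pvIntsAll (pvSplit r "-") with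
    | none => pvLoopA currentHour rs
    | some h =>
      if h.length = 2 ∧ (h.getD 0 0 ≤ currentHour ∧ currentHour ≤ h.getD 1 0) then true
      else if h.length = 1 ∧ h.getD 0 0 = currentHour then true
      else pvLoopA currentHour rs

def matchHours_py (hours : String) (currentHour : Int) : Bool :=
  pvLoopA currentHour (pvSplit hours ",")

-- ===== PORT B =====
-- phase 1: B's collecting loop (append → front-building structural recursion)
def pvCollect : List String → List (Int × Int)
  | [] => []
  | r :: rs =>
    match pvIntsAll (pvSplit r "-") with
    | none => pvCollect rs
    | some bounds =>
      if bounds.length = 1 then (bounds.getD 0 0, bounds.getD 0 0) :: pvCollect rs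
      else if bounds.length = 2 then (bounds.getD 0 0, bounds.getD 1 0) :: pvCollect rs
      else pvCollect rs

-- phase 2: B's scan over the sorted intervals, stopping at the first start > currentHour
def pvScan (currentHour : Int) : List (Int × Int) → Bool
  | [] => false
  | (lo, hi) :: t =>
    if lo > currentHour then false
    else if currentHour ≤ hi then true
    else pvScan currentHour t

def matchHours_py_alt (hours : String) (currentHour : Int) : Bool :=
  pvScan currentHour
    (PySem.List.sorted (pvCollect (pvSplit hours ",")) (fun iv => iv.1) false)

-- ===== PRECONDITION & SPEC =====
def Spec_matchHours_py (hours : String) (currentHour : Int) (out : Bool) : Prop := out = matchHours_py_alt hours currentHour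
instance (hours : String) (currentHour : Int) (out : Bool) : Decidable (Spec_matchHours_py hours currentHour out) := by unfold Spec_matchHours_py; infer_instance

-- ===== CLAIM (what is proved, stated in full; the proofs are below) =====
def Claim_equal_matchHours_py : Prop := ∀ (hours : String) (currentHour : Int), Dom_matchHours_py hours currentHour → Spec_matchHours_py hours currentHour (matchHours_py hours currentHour)

-- ===== LEMMAS AND PROOFS =====

-- the interval-membership predicate both programs decide
def pvHit (ch : Int) (iv : Int × Int) : Bool := decide (iv.1 ≤ ch) && decide (ch ≤ iv.2)

-- A's early-return loop is `any pvHit` over B's collected intervals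
lemma pvLoopA_eq_any (ch : Int) : ∀ ts : List String,
    pvLoopA ch ts = (pvCollect ts).any (pvHit ch) := by
  intro ts
  induction ts with
  | nil => simp [pvLoopA, pvCollect]
  | cons r rs ih =>
    simp only [pvLoopA, pvCollect]
    cases hp : pvIntsAll (pvSplit r "-") with
    | none => exact ih
    | some h =>
      match h with
      | [] => simpa [pvHit] using ih
      | [a] =>
        by_cases hEq : a = ch
        · simp [List.getD, pvHit, hEq]
        · have hf : pvHit ch (a, a) = false := by simp [pvHit]; omega
          simp [List.getD, hEq, hf, ih]
      | [a, b] =>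
        by_cases h1 : a ≤ ch <;> by_cases h2 : ch ≤ b
        all_goals
          first
          | (have ht : pvHit ch (a, b) = true := by simp [pvHit]; omega
             simp [List.getD, h1, h2, ht])
          | (have hf : pvHit ch (a, b) = false := by simp [pvHit]; omega
             simp [List.getD, h1, h2, hf, ih])
      | a :: b :: c :: t => simpa [pvHit] using ih

-- on a list whose starts are nondecreasing, the early-stop scan decides `any pvHit`
lemma pvScan_eq_any (ch : Int) : ∀ l : List (Int × Int),
    l.Pairwise (fun a b => a.1 ≤ b.1) → pvScan ch l = l.any (pvHit ch) := by
  intro l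
  induction l with
  | nil => simp [pvScan]
  | cons p t ih =>
    intro hpw
    obtain ⟨hhd, htl⟩ := List.pairwise_cons.mp hpw
    obtain ⟨lo, hi⟩ := p
    simp only [pvScan]
    by_cases hlo : lo > ch
    · -- every later interval starts at ≥ lo > ch, so nothing matches
      have hall : t.any (pvHit ch) = false :=
        List.any_eq_false.mpr (fun q hq => by
          have h1 := hhd q hq
          simp only [pvHit, Bool.and_eq_true, decide_eq_true_eq, not_and]
          omega)
      have hhd' : pvHit ch (lo, hi) = false := by simp [pvHit]; omega
      simp [hlo, hall, hhd']
    · by_cases hhi : ch ≤ hi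
      · have ht : pvHit ch (lo, hi) = true := by simp [pvHit]; omega
        simp [hlo, hhi, ht]
      · have hf : pvHit ch (lo, hi) = false := by simp [pvHit, hhi]
        simp [hlo, hhi, hf, ih htl]

-- ===== VERDICT (by name: the statement is the Claim_ definition above) =====
theorem matchHours_py_spec : Claim_equal_matchHours_py := by
  intro hours currentHour _
  unfold Spec_matchHours_py matchHours_py matchHours_py_alt
  rw [pvScan_eq_any currentHour _ (PySem.List.sorted_pairwise _ _),
      List.Perm.any_eq (PySem.List.sorted_perm _ _ _),
      pvLoopA_eq_any]
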